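-- pv_equiv track=rewrite | github.com/bendinglee/mythiq-core | advanced_prompt_analyzer.py | _determine_movement_type
-- ===== SOURCE A (Python) =====
-- def _determine_movement_type(prompt: str) -> str:
--     """Determine how the player moves in the game"""
--     if any(word in prompt for word in ['drive', 'car', 'vehicle', 'racing']):
--         return 'vehicle_control'
--     elif any(word in prompt for word in ['jump', 'platform', 'climb']):
--         return 'platformer_movement'
--     elif any(word in prompt for word in ['fly', 'flying', 'air', 'wings']):
--         return 'flight_control'
--     elif any(word in prompt for word in ['swim', 'underwater', 'dive']):
--         return 'swimming_control'
--     else: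
--         return 'standard_movement'
-- ===== SOURCE B (Python) =====
-- _KEYWORD_PRIORITY = {
--     'drive': 0, 'car': 0, 'vehicle': 0, 'racing': 0,
--     'jump': 1, 'platform': 1, 'climb': 1,
--     'fly': 2, 'flying': 2, 'air': 2, 'wings': 2,
--     'swim': 3, 'underwater': 3, 'dive': 3,
-- }
--
-- _LABELS = ['vehicle_control', 'platformer_movement', 'flight_control',
--            'swimming_control', 'standard_movement']
--
--
-- def _determine_movement_type(prompt: str) -> str:
--     """Aggregate the minimum priority over all matching keywords, then index a label table."""
--     best = 4
--     for kw, p in _KEYWORD_PRIORITY.items():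
--         if kw in prompt and p < best:
--             best = p
--     return _LABELS[best]
-- ===== Notes on version B (the rewrite author's own statement) =====
-- stated objective: alternative
-- what changed: Instead of an ordered if-elif chain with short-circuit first-match over per-category keyword lists, B uses a flat keyword-to-priority map, aggregates the minimum priority over all matching keywords in a single fold, and indexes into a label table; equivalence holds because the first matching category in A's order is exactly the category of minimum priority among all matches.
import Mathlib
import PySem

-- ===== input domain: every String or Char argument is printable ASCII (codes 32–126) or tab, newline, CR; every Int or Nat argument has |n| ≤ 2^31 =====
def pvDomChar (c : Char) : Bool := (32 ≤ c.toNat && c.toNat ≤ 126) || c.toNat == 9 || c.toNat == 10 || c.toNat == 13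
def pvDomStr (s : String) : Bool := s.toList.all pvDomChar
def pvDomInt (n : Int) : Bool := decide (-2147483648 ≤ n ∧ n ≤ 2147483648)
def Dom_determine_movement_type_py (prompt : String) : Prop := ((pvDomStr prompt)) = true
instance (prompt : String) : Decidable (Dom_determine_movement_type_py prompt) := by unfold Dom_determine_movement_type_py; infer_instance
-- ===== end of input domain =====

-- B replaces A's ordered first-match if-elif chain by a min-priority aggregation over a flat keyword→priority map, indexed into a label table (alternative decomposition; same cost).

-- ===== PORT A =====
def determine_movement_type_py (prompt : String) : String :=
  if ["drive", "car", "vehicle", "racing"].any (fun word => PySem.Str.isIn word prompt) then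
    "vehicle_control"
  else if ["jump", "platform", "climb"].any (fun word => PySem.Str.isIn word prompt) then
    "platformer_movement"
  else if ["fly", "flying", "air", "wings"].any (fun word => PySem.Str.isIn word prompt) then
    "flight_control"
  else if ["swim", "underwater", "dive"].any (fun word => PySem.Str.isIn word prompt) then
    "swimming_control"
  else
    "standard_movement"

-- ===== PORT B =====
def keywordPriority : List (String × Nat) :=
  [ ("drive", 0), ("car", 0), ("vehicle", 0), ("racing", 0),
    ("jump", 1), ("platform", 1), ("climb", 1),
    ("fly", 2), ("flying", 2), ("air", 2), ("wings", 2),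
    ("swim", 3), ("underwater", 3), ("dive", 3) ]

def movementLabels : List String :=
  ["vehicle_control", "platformer_movement", "flight_control",
   "swimming_control", "standard_movement"]

def determine_movement_type_py_alt (prompt : String) : String :=
  let best := keywordPriority.foldl
    (fun best kp => if PySem.Str.isIn kp.1 prompt && kp.2 < best then kp.2 else best) 4
  movementLabels.getD best "standard_movement"

-- ===== PRECONDITION & SPEC =====
def Spec_determine_movement_type_py (prompt : String) (out : String) : Prop := out = determine_movement_type_py_alt prompt
instance (prompt : String) (out : String) : Decidable (Spec_determine_movement_type_py prompt out) := by unfold Spec_determine_movement_type_py; infer_instance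

-- ===== CLAIM (what is proved, stated in full; the proofs are below) =====
def Claim_equal_determine_movement_type_py : Prop := ∀ (prompt : String), Dom_determine_movement_type_py prompt → Spec_determine_movement_type_py prompt (determine_movement_type_py prompt)

-- ===== LEMMAS AND PROOFS =====
-- Folding one priority group: the accumulator drops to p iff some keyword matches and p is smaller.
theorem foldGroup (m : String → Bool) (kws : List String) (p best : Nat) :
    (kws.map (fun kw => (kw, p))).foldl
      (fun b kp => if m kp.1 && decide (kp.2 < b) then kp.2 else b) best
    = if kws.any m && decide (p < best) then p else best := by
  induction kws generalizing best with
  | nil => simp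
  | cons kw rest ih =>
    simp only [List.map_cons, List.foldl_cons, List.any_cons]
    by_cases hm : m kw = true
    · by_cases hp : p < best
      · rw [if_pos (by simp [hm, hp]), ih]
        simp [hm, hp]
      · rw [if_neg (by simp [hp]), ih]
        simp [hp]
    · rw [if_neg (by simp [hm]), ih]
      simp [Bool.eq_false_iff.mpr hm]

-- foldGroup specialized to the keyword-containment test used by the port of B.
theorem foldGroup' (prompt : String) (kws : List String) (p best : Nat) :
    (kws.map (fun kw => (kw, p))).foldl
      (fun b kp => if PySem.Str.isIn kp.1 prompt && decide (kp.2 < b) then kp.2 else b) best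
    = if (kws.any fun w => PySem.Str.isIn w prompt) && decide (p < best) then p else best :=
  foldGroup (fun w => PySem.Str.isIn w prompt) kws p best

theorem keywordPriority_groups :
    keywordPriority
    = (["drive", "car", "vehicle", "racing"].map (fun kw => (kw, (0 : Nat))))
      ++ (["jump", "platform", "climb"].map (fun kw => (kw, (1 : Nat))))
      ++ (["fly", "flying", "air", "wings"].map (fun kw => (kw, (2 : Nat))))
      ++ (["swim", "underwater", "dive"].map (fun kw => (kw, (3 : Nat)))) := by
  rfl

-- ===== VERDICT (by name: the statement is the Claim_ definition above) =====
theorem determine_movement_type_py_spec : Claim_equal_determine_movement_type_py := by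
  intro prompt _
  unfold Spec_determine_movement_type_py determine_movement_type_py determine_movement_type_py_alt
  rw [keywordPriority_groups, List.foldl_append, List.foldl_append, List.foldl_append,
    foldGroup', foldGroup', foldGroup', foldGroup']
  generalize (["drive", "car", "vehicle", "racing"].any fun w => PySem.Str.isIn w prompt) = c0
  generalize (["jump", "platform", "climb"].any fun w => PySem.Str.isIn w prompt) = c1
  generalize (["fly", "flying", "air", "wings"].any fun w => PySem.Str.isIn w prompt) = c2
  generalize (["swim", "underwater", "dive"].any fun w => PySem.Str.isIn w prompt) = c3
  revert c0 c1 c2 c3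
  decide
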